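-- pv_equiv track=rewrite | github.com/ilubuntu/SkillTest | scripts/case_generation_agent.py | is_constraint_duplicate_with_public
-- ===== SOURCE A (Python) =====
-- def is_constraint_duplicate_with_public(rule_name, ast_rules, all_public_semantics):
--     for public_name, semantics in all_public_semantics.items():
--         key_decorators = semantics.get('key_decorators', [])
--         key_names = semantics.get('key_names', [])
--         key_types = semantics.get('key_types', [])
--         if key_decorators:
--             matched_decorators = set()
--             for ast_rule in ast_rules:
--                 if ast_rule.get('type') == 'decorator' and ast_rule.get('name') in key_decorators:
--                     matched_decorators.add(ast_rule.get('name'))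
--             if set(key_decorators) == matched_decorators:
--                 return True, public_name
--         if key_names:
--             for ast_rule in ast_rules:
--                 name = ast_rule.get('name', '')
--                 if name in key_names or ast_rule.get('type') == 'call' and name == key_names[0]:
--                     if len(ast_rules) == 1 or all(r.get('name') in key_names for r in ast_rules):
--                         return True, public_name
--         if key_types:
--             for ast_rule in ast_rules:
--                 if ast_rule.get('type') in key_types:
--                     return True, public_name
--     return False, None
-- ===== SOURCE B (Python) =====
-- def is_constraint_duplicate_with_public(rule_name, ast_rules, all_public_semantics):
--     # One pass over ast_rules to build indexes, so each public check is set lookups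
--     # instead of a rescan of ast_rules.
--     decorator_names = {r.get('name') for r in ast_rules if r.get('type') == 'decorator'}
--     names = [r.get('name') for r in ast_rules]
--     blank_names = [r.get('name', '') for r in ast_rules]
--     call_names = {r.get('name', '') for r in ast_rules if r.get('type') == 'call'}
--     rule_types = {r.get('type') for r in ast_rules}
--     single = len(ast_rules) == 1
--     for public_name, semantics in all_public_semantics.items():
--         kd = semantics.get('key_decorators', [])
--         kn = semantics.get('key_names', [])
--         kt = semantics.get('key_types', [])
--         if kd and all(d in decorator_names for d in kd):
--             return True, public_name
--         if kn and (any(b in kn for b in blank_names) or kn[0] in call_names) \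
--               and (single or all(nm in kn for nm in names)):
--             return True, public_name
--         if any(t in rule_types for t in kt):
--             return True, public_name
--     return False, None
-- ===== Notes on version B (the rewrite author's own statement) =====
-- stated objective: alternative
-- what changed: B builds indexes of ast_rules in one pass (set of decorator names, name lists, set of call-rule names, set of rule types) and answers every public-semantics block with set/list lookups, instead of A's rescan of ast_rules inside every block of every public entry.
import Mathlib
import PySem

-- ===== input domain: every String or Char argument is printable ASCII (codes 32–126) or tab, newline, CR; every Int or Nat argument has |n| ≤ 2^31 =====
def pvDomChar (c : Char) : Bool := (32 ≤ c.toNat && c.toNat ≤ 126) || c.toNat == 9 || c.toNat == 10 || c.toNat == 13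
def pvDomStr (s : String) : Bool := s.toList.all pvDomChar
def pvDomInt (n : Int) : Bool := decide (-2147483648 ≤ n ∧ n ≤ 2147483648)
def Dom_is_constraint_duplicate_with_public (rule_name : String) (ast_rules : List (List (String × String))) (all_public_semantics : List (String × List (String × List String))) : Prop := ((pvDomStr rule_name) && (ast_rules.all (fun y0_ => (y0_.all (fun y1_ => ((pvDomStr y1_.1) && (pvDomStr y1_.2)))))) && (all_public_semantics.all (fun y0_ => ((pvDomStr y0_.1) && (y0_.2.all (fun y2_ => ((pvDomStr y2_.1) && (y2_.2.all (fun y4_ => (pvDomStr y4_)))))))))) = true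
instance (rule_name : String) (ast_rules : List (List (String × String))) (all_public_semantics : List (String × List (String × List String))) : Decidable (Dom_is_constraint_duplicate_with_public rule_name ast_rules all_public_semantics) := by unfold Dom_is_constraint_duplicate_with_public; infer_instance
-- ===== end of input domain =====

-- B replaces A's per-public rescans of ast_rules by indexes (sets of decorator
-- names, call names, rule types; name lists) built once over ast_rules, then
-- answers each public block with set/list lookups — objective: alternative.

-- ===== PORT A =====
-- dict.get(k) on a string-valued dict = first-match association lookup
-- (Python dict keys are unique, so first match is the match)

-- the inner 'for ast_rule in ast_rules: if …decorator… : matched.add(name)' loop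
-- ('r.get('type')=='decorator' and r.get('name') in kd'; a missing 'name' is None,
-- never in kd, so matching on the lookup first is the same test)
def aMatchedStep (kd : List String) (acc : PySem.Set String) (r : List (String × String)) : PySem.Set String :=
  match List.lookup "name" r with
  | some n =>
      if (List.lookup "type" r == some "decorator") && kd.contains n
      then PySem.Set.add acc n else acc
  | none => acc

def aMatched (kd : List String) (rules : List (List (String × String))) : PySem.Set String :=
  rules.foldl (aMatchedStep kd) PySem.Set.empty

-- 'all(r.get('name') in key_names for r in ast_rules)' (missing name = None ∉ kn)
def aAllNames (kn : List String) (rules : List (List (String × String))) : Bool :=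
  rules.all (fun r => match List.lookup "name" r with
    | some n => kn.contains n
    | none => false)

-- the 'if key_names:' loop with its early return; called only with kn ≠ [],
-- so key_names[0] = kn.headD ""
def aNames (kn : List String) (rules ast_rules : List (List (String × String))) : Bool :=
  match rules with
  | [] => false
  | r :: rest =>
      let name := (List.lookup "name" r).getD ""
      if kn.contains name || ((List.lookup "type" r == some "call") && (name == kn.headD "")) then
        if ast_rules.length == 1 || aAllNames kn ast_rules then true
        else aNames kn rest ast_rules
      else aNames kn rest ast_rules

-- the 'if key_types:' loop with its early return
def aTypes (kt : List String) (rules : List (List (String × String))) : Bool :=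
  match rules with
  | [] => false
  | r :: rest =>
      if (match List.lookup "type" r with | some t => kt.contains t | none => false)
      then true else aTypes kt rest

def aLoop (publics : List (String × List (String × List String)))
    (ast_rules : List (List (String × String))) : Bool × Option String :=
  match publics with
  | [] => (false, none)
  | (public_name, semantics) :: rest =>
      let kd := (List.lookup "key_decorators" semantics).getD []
      let kn := (List.lookup "key_names" semantics).getD []
      let kt := (List.lookup "key_types" semantics).getD []
      if !kd.isEmpty && PySem.Set.equal (PySem.Set.ofList kd) (aMatched kd ast_rules) then
        (true, some public_name)
      else if !kn.isEmpty && aNames kn ast_rules ast_rules then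
        (true, some public_name)
      else if !kt.isEmpty && aTypes kt ast_rules then
        (true, some public_name)
      else aLoop rest ast_rules

def is_constraint_duplicate_with_public (rule_name : String) (ast_rules : List (List (String × String))) (all_public_semantics : List (String × List (String × List String))) : Bool × Option String :=
  aLoop all_public_semantics ast_rules

-- ===== PORT B =====
-- {r.get('name') for r in ast_rules if r.get('type') == 'decorator'}
def bDecNames (rules : List (List (String × String))) : PySem.Set (Option String) :=
  PySem.Set.ofList ((rules.filter (fun r => List.lookup "type" r == some "decorator")).map
    (fun r => List.lookup "name" r))

-- [r.get('name') for r in ast_rules]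
def bNames (rules : List (List (String × String))) : List (Option String) :=
  rules.map (fun r => List.lookup "name" r)

-- [r.get('name', '') for r in ast_rules]
def bBlankNames (rules : List (List (String × String))) : List String :=
  rules.map (fun r => (List.lookup "name" r).getD "")

-- {r.get('name', '') for r in ast_rules if r.get('type') == 'call'}
def bCallNames (rules : List (List (String × String))) : PySem.Set String :=
  PySem.Set.ofList ((rules.filter (fun r => List.lookup "type" r == some "call")).map
    (fun r => (List.lookup "name" r).getD ""))

-- {r.get('type') for r in ast_rules}
def bRuleTypes (rules : List (List (String × String))) : PySem.Set (Option String) :=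
  PySem.Set.ofList (rules.map (fun r => List.lookup "type" r))

def bLoop (publics : List (String × List (String × List String)))
    (decNames : PySem.Set (Option String)) (names : List (Option String))
    (blankNames : List String) (callNames : PySem.Set String)
    (ruleTypes : PySem.Set (Option String)) (single : Bool) : Bool × Option String :=
  match publics with
  | [] => (false, none)
  | (public_name, semantics) :: rest =>
      let kd := (List.lookup "key_decorators" semantics).getD []
      let kn := (List.lookup "key_names" semantics).getD []
      let kt := (List.lookup "key_types" semantics).getD []
      if !kd.isEmpty && kd.all (fun d => PySem.Set.contains decNames (some d)) then
        (true, some public_name)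
      else if !kn.isEmpty
          && ((blankNames.any (fun b => kn.contains b) || PySem.Set.contains callNames (kn.headD ""))
              && (single || names.all (fun n => (n.map (fun x => kn.contains x)).getD false))) then
        (true, some public_name)
      else if kt.any (fun t => PySem.Set.contains ruleTypes (some t)) then
        (true, some public_name)
      else bLoop rest decNames names blankNames callNames ruleTypes single

def is_constraint_duplicate_with_public_alt (rule_name : String) (ast_rules : List (List (String × String))) (all_public_semantics : List (String × List (String × List String))) : Bool × Option String :=
  bLoop all_public_semantics (bDecNames ast_rules) (bNames ast_rules)
    (bBlankNames ast_rules) (bCallNames ast_rules) (bRuleTypes ast_rules)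
    (ast_rules.length == 1)

-- ===== PRECONDITION & SPEC =====
def Spec_is_constraint_duplicate_with_public (rule_name : String) (ast_rules : List (List (String × String))) (all_public_semantics : List (String × List (String × List String))) (out : Bool × Option String) : Prop := out = is_constraint_duplicate_with_public_alt rule_name ast_rules all_public_semantics
instance (rule_name : String) (ast_rules : List (List (String × String))) (all_public_semantics : List (String × List (String × List String))) (out : Bool × Option String) : Decidable (Spec_is_constraint_duplicate_with_public rule_name ast_rules all_public_semantics out) := by unfold Spec_is_constraint_duplicate_with_public; infer_instance

-- ===== CLAIM (what is proved, stated in full; the proofs are below) =====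
def Claim_equal_is_constraint_duplicate_with_public : Prop := ∀ (rule_name : String) (ast_rules : List (List (String × String))) (all_public_semantics : List (String × List (String × List String))), Dom_is_constraint_duplicate_with_public rule_name ast_rules all_public_semantics → Spec_is_constraint_duplicate_with_public rule_name ast_rules all_public_semantics (is_constraint_duplicate_with_public rule_name ast_rules all_public_semantics)

-- ===== LEMMAS AND PROOFS =====

theorem mem_aMatched_foldl (kd : List String) (rules : List (List (String × String)))
    (acc : PySem.Set String) (x : String) :
    x ∈ rules.foldl (aMatchedStep kd) acc ↔ x ∈ acc ∨ (x ∈ kd ∧ ∃ r ∈ rules,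
      List.lookup "type" r = some "decorator" ∧ List.lookup "name" r = some x) := by
  induction rules generalizing acc with
  | nil => simp
  | cons r rest ih =>
      simp only [List.foldl_cons, ih]
      have hstep : x ∈ aMatchedStep kd acc r ↔ x ∈ acc ∨ (x ∈ kd ∧
          List.lookup "type" r = some "decorator" ∧ List.lookup "name" r = some x) := by
        unfold aMatchedStep
        cases h : List.lookup "name" r with
        | none => simp
        | some n =>
            by_cases hd : List.lookup "type" r = some "decorator" <;> by_cases hk : n ∈ kd <;>
              simp [hd, hk, PySem.Set.mem_add] <;> aesop
      rw [hstep]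
      simp only [List.mem_cons]
      aesop

theorem mem_bDecNames (rules : List (List (String × String))) (x : String) :
    some x ∈ bDecNames rules ↔ ∃ r ∈ rules,
      List.lookup "type" r = some "decorator" ∧ List.lookup "name" r = some x := by
  simp [bDecNames, PySem.Set.mem_ofList, List.mem_map, List.mem_filter]
  aesop

theorem dec_block_eq (kd : List String) (rules : List (List (String × String))) :
    PySem.Set.equal (PySem.Set.ofList kd) (aMatched kd rules)
      = kd.all (fun d => PySem.Set.contains (bDecNames rules) (some d)) := by
  rw [Bool.eq_iff_iff]
  rw [PySem.Set.equal_iff]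
  simp only [List.all_eq_true, PySem.Set.contains_iff, mem_bDecNames,
    PySem.Set.mem_ofList, aMatched, mem_aMatched_foldl]
  constructor
  · intro h d hd
    rcases (h d).mp hd with hx | ⟨-, hP⟩
    · simp [PySem.Set.empty] at hx
    · exact hP
  · intro h x
    constructor
    · intro hx; exact Or.inr ⟨hx, h x hx⟩
    · rintro (hx | ⟨hx, -⟩)
      · simp [PySem.Set.empty] at hx
      · exact hx

theorem aNames_eq_any (kn : List String) (rules ast_rules : List (List (String × String))) :
    aNames kn rules ast_rules
      = (rules.any (fun r =>
            kn.contains ((List.lookup "name" r).getD "")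
              || ((List.lookup "type" r == some "call")
                  && ((List.lookup "name" r).getD "" == kn.headD "")))
         && ((ast_rules.length == 1) || aAllNames kn ast_rules)) := by
  induction rules with
  | nil => simp [aNames]
  | cons r rest ih =>
      simp only [aNames, List.any_cons, ih]
      cases h1 : (kn.contains ((List.lookup "name" r).getD "")
          || ((List.lookup "type" r == some "call")
              && ((List.lookup "name" r).getD "" == kn.headD ""))) <;>
        cases h2 : ((ast_rules.length == 1) || aAllNames kn ast_rules) <;>
          simp [h1, h2]

theorem aAllNames_eq (kn : List String) (rules : List (List (String × String))) :
    aAllNames kn rules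
      = (bNames rules).all (fun n => (n.map (fun x => kn.contains x)).getD false) := by
  simp only [aAllNames, bNames, List.all_map]
  congr 1
  funext r
  cases h : List.lookup "name" r <;> simp [h]

theorem any_cond_eq (kn : List String) (rules : List (List (String × String))) :
    (rules.any (fun r =>
        kn.contains ((List.lookup "name" r).getD "")
          || ((List.lookup "type" r == some "call")
              && ((List.lookup "name" r).getD "" == kn.headD ""))))
      = ((bBlankNames rules).any (fun b => kn.contains b)
          || PySem.Set.contains (bCallNames rules) (kn.headD "")) := by
  rw [Bool.eq_iff_iff]
  simp only [List.any_eq_true, Bool.or_eq_true, Bool.and_eq_true, beq_iff_eq,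
    bBlankNames, bCallNames, PySem.Set.contains_iff, PySem.Set.mem_ofList,
    List.mem_map, List.mem_filter, List.any_map]
  aesop

theorem names_block_eq (kn : List String) (ast_rules : List (List (String × String))) :
    aNames kn ast_rules ast_rules
      = (((bBlankNames ast_rules).any (fun b => kn.contains b)
            || PySem.Set.contains (bCallNames ast_rules) (kn.headD ""))
         && ((ast_rules.length == 1)
            || (bNames ast_rules).all (fun n => (n.map (fun x => kn.contains x)).getD false))) := by
  rw [aNames_eq_any, any_cond_eq, aAllNames_eq]

theorem types_block_eq (kt : List String) (rules : List (List (String × String))) :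
    (!kt.isEmpty && aTypes kt rules)
      = kt.any (fun t => PySem.Set.contains (bRuleTypes rules) (some t)) := by
  have hA : aTypes kt rules = rules.any (fun r => match List.lookup "type" r with
      | some t => kt.contains t | none => false) := by
    induction rules with
    | nil => simp [aTypes]
    | cons r rest ih => simp only [aTypes, List.any_cons, ih]; split <;> simp
  rw [Bool.eq_iff_iff]
  rw [hA]
  simp only [Bool.and_eq_true, List.any_eq_true, bRuleTypes, PySem.Set.contains_iff,
    PySem.Set.mem_ofList, List.mem_map]
  constructor
  · rintro ⟨-, r, hr, hmatch⟩
    cases h : List.lookup "type" r with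
    | none => rw [h] at hmatch; cases hmatch
    | some t => rw [h] at hmatch; simp at hmatch; exact ⟨t, hmatch, r, hr, h⟩
  · rintro ⟨t, ht, r, hr, h⟩
    have hne : (!kt.isEmpty) = true := by
      cases kt with
      | nil => cases ht
      | cons a l => rfl
    exact ⟨hne, r, hr, by simp [h, ht]⟩

theorem loop_eq (publics : List (String × List (String × List String)))
    (ast_rules : List (List (String × String))) :
    aLoop publics ast_rules
      = bLoop publics (bDecNames ast_rules) (bNames ast_rules) (bBlankNames ast_rules)
          (bCallNames ast_rules) (bRuleTypes ast_rules) (ast_rules.length == 1) := by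
  induction publics with
  | nil => rfl
  | cons p rest ih =>
      obtain ⟨pname, sem⟩ := p
      simp only [aLoop, bLoop, ih]
      rw [dec_block_eq, names_block_eq, types_block_eq]

-- ===== VERDICT (by name: the statement is the Claim_ definition above) =====
theorem is_constraint_duplicate_with_public_spec : Claim_equal_is_constraint_duplicate_with_public := by
  intro rn ast pubs _
  unfold Spec_is_constraint_duplicate_with_public is_constraint_duplicate_with_public is_constraint_duplicate_with_public_alt
  exact loop_eq pubs ast
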